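-- pv_equiv track=rewrite | github.com/spikerheado1234/triton-fun | acsr_helpers.py | create_blocked_mask
-- ===== SOURCE A (Python) =====
-- def create_blocked_mask(s : int, p  : int):
--     mask = [[0 for _ in range(s)] for _ in range(s)]
--
--     for i in range(s):
--         for j in range(s):
--             if i < p:  ## We are dealing with the first block here.
--                 if j < p:
--                     mask[i][j] = 1
--             else:
--                 ## Now we have to compute if (i,j) belong to a block.
--                 block_num = i // p
--                 start_col = (block_num-1)*p
--                 end_col = start_col + 2*p
--                 if start_col <= j and  j < end_col:
--                     mask[i][j] = 1
--
--     return mask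
-- ===== SOURCE B (Python) =====
-- def create_blocked_mask(s: int, p: int):
--     rows = []
--     for i in range(s):
--         block_num = i // p
--         lo = min(s, max(0, (block_num - 1) * p))
--         hi = min(s, max(lo, (block_num + 1) * p))
--         rows.append([0] * lo + [1] * (hi - lo) + [0] * (s - hi))
--     return rows
-- ===== Notes on version B (the rewrite author's own statement) =====
-- stated objective: simpler
-- what changed: B replaces A's per-cell nested loop with an if/else branch by a single per-row computation of the closed-form band [lo, hi) (lo = clamp((block-1)*p), hi = clamp((block+1)*p)) and builds each row in one shot as 0-run, 1-run, 0-run; the explicit first-block branch disappears since block 0 yields the same clamped range.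
import Mathlib
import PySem

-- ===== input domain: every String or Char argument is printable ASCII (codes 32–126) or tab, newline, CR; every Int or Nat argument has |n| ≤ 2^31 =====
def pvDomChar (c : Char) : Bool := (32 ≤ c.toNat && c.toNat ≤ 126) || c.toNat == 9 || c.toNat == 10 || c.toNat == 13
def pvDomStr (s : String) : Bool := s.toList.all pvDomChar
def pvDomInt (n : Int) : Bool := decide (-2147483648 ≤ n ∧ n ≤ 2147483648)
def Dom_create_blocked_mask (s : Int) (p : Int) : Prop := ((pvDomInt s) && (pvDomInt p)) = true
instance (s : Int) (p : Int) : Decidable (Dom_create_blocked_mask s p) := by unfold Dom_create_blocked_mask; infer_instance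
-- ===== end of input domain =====

-- B builds each row in one shot from the closed-form band [lo, hi) instead of testing every cell
-- with a per-cell branch (objective: simpler; same O(s^2) output-bound cost).

-- ===== PORT A =====
-- mask[i][j] = 1 is ported as List.modify/List.set; i, j come from range(s) so are ≥ 0 and .toNat is exact.
-- Python's i // p raises ZeroDivisionError when p = 0 (reached only when s > 0): excluded by Pre_ below;
-- PySem.Int.floordiv is total, which is harmless outside Pre_.
def create_blocked_mask (s : Int) (p : Int) : List (List Int) :=
  let mask := (PySem.List.pyRange 0 s 1).map (fun _ => (PySem.List.pyRange 0 s 1).map (fun _ => (0 : Int)))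
  (PySem.List.pyRange 0 s 1).foldl (fun mask i =>
    (PySem.List.pyRange 0 s 1).foldl (fun mask j =>
      if i < p then
        if j < p then mask.modify i.toNat (fun row => row.set j.toNat 1) else mask
      else
        let block_num := PySem.Int.floordiv i p
        let start_col := (block_num - 1) * p
        let end_col := start_col + 2 * p
        if start_col ≤ j ∧ j < end_col then mask.modify i.toNat (fun row => row.set j.toNat 1) else mask)
      mask) mask

-- ===== PORT B =====
def create_blocked_mask_alt (s : Int) (p : Int) : List (List Int) :=
  (PySem.List.pyRange 0 s 1).foldl (fun rows i =>
    let block_num := PySem.Int.floordiv i p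
    let lo := min s (max 0 ((block_num - 1) * p))
    let hi := min s (max lo ((block_num + 1) * p))
    rows ++ [List.replicate lo.toNat 0 ++ List.replicate (hi - lo).toNat 1 ++
             List.replicate (s - hi).toNat 0]) []

-- ===== PRECONDITION & SPEC =====
-- Pre_ excludes exactly s > 0 with p = 0, where the Python A (and B alike) raises ZeroDivisionError.
def Pre_create_blocked_mask (s : Int) (p : Int) : Prop := s ≤ 0 ∨ p ≠ 0
instance (s : Int) (p : Int) : Decidable (Pre_create_blocked_mask s p) := by
  unfold Pre_create_blocked_mask; infer_instance

def pvWitness_create_blocked_mask : Int × Int := (4, 2)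

def Spec_create_blocked_mask (s : Int) (p : Int) (out : List (List Int)) : Prop := out = create_blocked_mask_alt s p
instance (s : Int) (p : Int) (out : List (List Int)) : Decidable (Spec_create_blocked_mask s p out) := by unfold Spec_create_blocked_mask; infer_instance

-- ===== CLAIM (what is proved, stated in full; the proofs are below) =====
def Claim_equal_create_blocked_mask : Prop := ∀ (s : Int) (p : Int), Dom_create_blocked_mask s p → Pre_create_blocked_mask s p → Spec_create_blocked_mask s p (create_blocked_mask s p)

-- ===== LEMMAS AND PROOFS =====

-- The per-cell condition of A's inner loop, for a fixed row i.
def cellCond (p i j : Int) : Bool :=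
  if i < p then decide (j < p)
  else decide ((PySem.Int.floordiv i p - 1) * p ≤ j ∧ j < (PySem.Int.floordiv i p - 1) * p + 2 * p)

-- B's band bounds for row i.
def bandLo (s p i : Int) : Int := min s (max 0 ((PySem.Int.floordiv i p - 1) * p))
def bandHi (s p i : Int) : Int := min s (max (bandLo s p i) ((PySem.Int.floordiv i p + 1) * p))

lemma band_bounds (s p i : Int) (hs : 0 ≤ s) :
    0 ≤ bandLo s p i ∧ bandLo s p i ≤ bandHi s p i ∧ bandHi s p i ≤ s := by
  unfold bandHi bandLo; omega

-- Folding `set`s (all to the constant 1) over a row, characterised index-wise.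
lemma rowFold_getElem? (c : Int → Bool) (jl : List Int) (r : List Int)
    (hjl : ∀ j ∈ jl, 0 ≤ j ∧ j < (r.length : Int)) (k : Nat) :
    (jl.foldl (fun r j => if c j then r.set j.toNat 1 else r) r)[k]? =
      if jl.any (fun j => j == (k : Int) && c j) then some 1 else r[k]? := by
  induction jl generalizing r with
  | nil => simp
  | cons j rest ih =>
    have hj := hjl j (by simp)
    have hrest : ∀ x ∈ rest, 0 ≤ x ∧ x < (((if c j then r.set j.toNat 1 else r).length : Nat) : Int) := by
      intro x hx
      have := hjl x (by simp [hx])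
      split <;> simpa [List.length_set] using this
    simp only [List.foldl_cons, List.any_cons]
    rw [ih _ hrest]
    by_cases hc : c j
    · by_cases hjk : j = (k : Int)
      · subst hjk
        have hkr : k < r.length := by omega
        have htn : (k : Int).toNat = k := by omega
        by_cases hr : rest.any (fun j => j == ((k : Nat) : Int) && c j) <;>
          simp [hc, hr, htn, hkr]
      · have htn : j.toNat ≠ k := by omega
        have hjk' : ¬ ((k : Int) = j) := fun h => hjk h.symm
        by_cases hr : rest.any (fun j => j == (k : Int) && c j) <;>
          simp [hc, hjk, hr, htn]
    · simp [hc]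

-- The inner j-loop only ever touches row iN: it is one `modify` of that row.
lemma innerFold_modify (iN : Nat) (c : Int → Bool) (jl : List Int) (m : List (List Int)) :
    jl.foldl (fun m j => if c j then m.modify iN (fun row => row.set j.toNat 1) else m) m
      = m.modify iN (fun row => jl.foldl (fun row j => if c j then row.set j.toNat 1 else row) row) := by
  induction jl generalizing m with
  | nil =>
    show m = m.modify iN id
    exact (List.modify_id iN m).symm
  | cons j rest ih =>
    simp only [List.foldl_cons]
    by_cases hc : c j
    · rw [if_pos hc, ih, List.modify_modify_eq]
      congr 1
      funext row
      simp [hc, Function.comp]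
    · rw [if_neg hc, ih]
      congr 1
      funext row
      simp [hc]
  
-- Folding `modify` over distinct nonnegative indices, characterised index-wise.
lemma maskFold_getElem? (g : Int → List Int → List Int) (il : List Int)
    (h0 : ∀ i ∈ il, 0 ≤ i) (hnd : il.Nodup) (m : List (List Int)) (k : Nat) :
    (il.foldl (fun m i => m.modify i.toNat (g i)) m)[k]? =
      if (k : Int) ∈ il then (g (k : Int)) <$> m[k]? else m[k]? := by
  induction il generalizing m with
  | nil => simp
  | cons i rest ih =>
    have hi0 := h0 i (by simp)
    simp only [List.foldl_cons, List.mem_cons]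
    rw [ih (fun x hx => h0 x (by simp [hx])) (List.nodup_cons.mp hnd).2]
    by_cases hik : i = (k : Int)
    · have hkn : (k : Int) ∉ rest := hik ▸ (List.nodup_cons.mp hnd).1
      have htn : i.toNat = k := by omega
      simp [hik, hkn, List.getElem?_modify]
    · have htn : i.toNat ≠ k := by omega
      have hik' : ¬ ((k : Int) = i) := fun h => hik h.symm
      by_cases hkr : (k : Int) ∈ rest <;>
        simp [hik', hkr, htn]

-- The arithmetic core: for 0 ≤ i,j < s and p ≠ 0, A's per-cell test is membership in B's band.
lemma cell_iff (s p i j : Int) (hp : p ≠ 0) (hi0 : 0 ≤ i) (his : i < s) (hj0 : 0 ≤ j) (hjs : j < s) :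
    (cellCond p i j = true) ↔ (bandLo s p i ≤ j ∧ j < bandHi s p i) := by
  rcases lt_or_gt_of_ne hp with hneg | hpos
  · -- p < 0: the else-branch interval [sc, sc+2p) is empty, and B's band is empty too.
    have hip : ¬ i < p := by omega
    have hfd := PySem.Int.floordiv_mul_add_mod i p
    have hmb := PySem.Int.mod_neg_bounds i hneg
    have e1 : (PySem.Int.floordiv i p - 1) * p = PySem.Int.floordiv i p * p - p := by ring
    have e2 : (PySem.Int.floordiv i p + 1) * p = PySem.Int.floordiv i p * p + p := by ring
    unfold cellCond bandHi bandLo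
    rw [if_neg hip]
    rw [e1, e2]
    simp only [decide_eq_true_eq]
    omega
  · -- p > 0
    by_cases hip : i < p
    · have hq : PySem.Int.floordiv i p = 0 := by
        rw [PySem.Int.floordiv_eq_iff_of_pos hpos]; constructor <;> nlinarith
      unfold cellCond bandHi bandLo
      rw [if_pos hip, hq]
      rw [show ((0 : Int) - 1) * p = -p from by ring, show ((0 : Int) + 1) * p = p from by ring]
      simp only [decide_eq_true_eq]
      omega
    · have h1 : PySem.Int.floordiv i p * p ≤ i :=
        (PySem.Int.le_floordiv_iff_mul_le hpos).mp (le_refl _)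
      have h2 : i < (PySem.Int.floordiv i p + 1) * p :=
        (PySem.Int.floordiv_lt_iff_lt_mul hpos).mp (by omega)
      have h3 : 1 ≤ PySem.Int.floordiv i p :=
        (PySem.Int.le_floordiv_iff_mul_le hpos).mpr (by omega)
      have h4 : 0 ≤ (PySem.Int.floordiv i p - 1) * p := mul_nonneg (by omega) (by omega)
      have e1 : (PySem.Int.floordiv i p - 1) * p = PySem.Int.floordiv i p * p - p := by ring
      have e2 : (PySem.Int.floordiv i p + 1) * p = PySem.Int.floordiv i p * p + p := by ring
      rw [e2] at h2
      rw [e1] at h4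
      unfold cellCond bandHi bandLo
      rw [if_neg hip]
      rw [e1, e2]
      simp only [decide_eq_true_eq]
      omega

-- Index-wise value of B's row (three concatenated replicates).
lemma rowB_getElem? (a b c : Nat) (j : Nat) :
    (List.replicate a (0 : Int) ++ List.replicate b 1 ++ List.replicate c 0)[j]? =
      if j < a then some 0 else if j < a + b then some 1 else if j < a + b + c then some 0
      else none := by
  simp only [List.getElem?_append, List.length_append, List.length_replicate,
    List.getElem?_replicate]
  split_ifs <;> first | rfl | omega

-- ===== VERDICT (by name: the statement is the Claim_ definition above) =====
theorem create_blocked_mask_spec : Claim_equal_create_blocked_mask := by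
  intro s p _ hpre
  unfold Spec_create_blocked_mask
  by_cases hs : s ≤ 0
  · have : PySem.List.pyRange 0 s 1 = [] := PySem.List.pyRange_one_eq_nil (by omega)
    simp [create_blocked_mask, create_blocked_mask_alt, this]
  · have hp : p ≠ 0 := hpre.resolve_left hs
    have hs0 : 0 < s := by omega
    -- B is a map over the rows
    have hB : create_blocked_mask_alt s p = (PySem.List.pyRange 0 s 1).map (fun i =>
        List.replicate (bandLo s p i).toNat (0 : Int) ++
        List.replicate (bandHi s p i - bandLo s p i).toNat 1 ++
        List.replicate (s - bandHi s p i).toNat 0) := by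
      unfold create_blocked_mask_alt
      rw [PySem.List.foldl_append_singleton_eq_map]
      simp [bandLo, bandHi]
    -- A is a fold of per-row modifies
    have hA : create_blocked_mask s p = (PySem.List.pyRange 0 s 1).foldl
        (fun m i => m.modify i.toNat (fun row =>
          (PySem.List.pyRange 0 s 1).foldl
            (fun row j => if cellCond p i j then row.set j.toNat 1 else row) row))
        ((PySem.List.pyRange 0 s 1).map (fun _ =>
          (PySem.List.pyRange 0 s 1).map (fun _ => (0 : Int)))) := by
      have hfun : ∀ (i : Int), (fun (mask : List (List Int)) (j : Int) =>
          if i < p then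
            if j < p then mask.modify i.toNat (fun row => row.set j.toNat 1) else mask
          else
            let block_num := PySem.Int.floordiv i p
            let start_col := (block_num - 1) * p
            let end_col := start_col + 2 * p
            if start_col ≤ j ∧ j < end_col then mask.modify i.toNat (fun row => row.set j.toNat 1)
            else mask)
        = fun mask j => if cellCond p i j then mask.modify i.toNat (fun row => row.set j.toNat 1)
            else mask := by
        intro i
        funext mask j
        by_cases hip : i < p <;> simp [cellCond, hip]
      show (PySem.List.pyRange 0 s 1).foldl (fun mask i =>
          (PySem.List.pyRange 0 s 1).foldl (fun mask j =>
            if i < p then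
              if j < p then mask.modify i.toNat (fun row => row.set j.toNat 1) else mask
            else
              let block_num := PySem.Int.floordiv i p
              let start_col := (block_num - 1) * p
              let end_col := start_col + 2 * p
              if start_col ≤ j ∧ j < end_col then mask.modify i.toNat (fun row => row.set j.toNat 1)
              else mask) mask)
          ((PySem.List.pyRange 0 s 1).map (fun _ =>
            (PySem.List.pyRange 0 s 1).map (fun _ => (0 : Int)))) = _
      refine PySem.List.foldl_congr_mem _ _ _ _ (fun m i _ => ?_)
      rw [hfun i, innerFold_modify]
    rw [hA, hB]
    apply List.ext_getElem?
    intro k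
    have hlen : (PySem.List.pyRange 0 s 1).length = s.toNat := by
      simp [PySem.List.length_pyRange_one]
    rw [maskFold_getElem? _ _ (fun i hi => ((PySem.List.mem_pyRange_one).mp hi).1)
      (PySem.List.nodup_pyRange_one 0 s)]
    rw [List.getElem?_map, List.getElem?_map, PySem.List.getElem?_pyRange_one]
    by_cases hk : k < (s - 0).toNat
    · have hks : (k : Int) < s := by omega
      have hmem : (k : Int) ∈ PySem.List.pyRange 0 s 1 :=
        (PySem.List.mem_pyRange_one).mpr ⟨by omega, hks⟩
      rw [if_pos hmem, if_pos hk]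
      simp only [Option.map_eq_map, Option.map_some, zero_add]
      refine congrArg some ?_
      -- row equality for row k
      obtain ⟨hlo0, hlohi, hhis⟩ := band_bounds s p (k : Int) (by omega)
      apply List.ext_getElem?
      intro j
      have hzlen : ((PySem.List.pyRange 0 s 1).map (fun _ => (0 : Int))).length = s.toNat := by
        simp [PySem.List.length_pyRange_one]
      rw [rowFold_getElem? _ _ _ (by
        intro x hx
        have := (PySem.List.mem_pyRange_one).mp hx
        rw [hzlen]
        omega)]
      rw [rowB_getElem?]
      by_cases hjs : (j : Int) < s
      · have hcell := cell_iff s p (k : Int) (j : Int) hp (by omega) hks (by omega) hjs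
        by_cases hc : cellCond p (k : Int) (j : Int) = true
        · have hanyT : (PySem.List.pyRange 0 s 1).any
              (fun j' => j' == (j : Int) && cellCond p (k : Int) j') = true :=
            List.any_eq_true.mpr ⟨(j : Int), (PySem.List.mem_pyRange_one).mpr ⟨by omega, hjs⟩,
              by simp [hc]⟩
          have hband := hcell.mp hc
          have h1 : ¬ j < (bandLo s p (k : Int)).toNat := by omega
          have h2 : j < (bandLo s p (k : Int)).toNat +
              (bandHi s p (k : Int) - bandLo s p (k : Int)).toNat := by omega
          rw [if_pos hanyT, if_neg h1, if_pos h2]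
        · have hanyF : ¬ ((PySem.List.pyRange 0 s 1).any
              (fun j' => j' == (j : Int) && cellCond p (k : Int) j') = true) := by
            intro h
            obtain ⟨x, hx, hxe⟩ := List.any_eq_true.mp h
            have hxx : x = (j : Int) ∧ cellCond p (k : Int) x = true := by
              simpa using hxe
            exact hc (hxx.1 ▸ hxx.2)
          have hband : ¬ (bandLo s p (k : Int) ≤ (j : Int) ∧ (j : Int) < bandHi s p (k : Int)) :=
            fun h => hc (hcell.mpr h)
          have hjn : j < (s - 0).toNat := by omega
          rw [if_neg hanyF, List.getElem?_map, PySem.List.getElem?_pyRange_one, if_pos hjn]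
          split_ifs <;> first | rfl | omega
      · have hanyF : ¬ ((PySem.List.pyRange 0 s 1).any
            (fun j' => j' == (j : Int) && cellCond p (k : Int) j') = true) := by
          intro h
          obtain ⟨x, hx, hxe⟩ := List.any_eq_true.mp h
          have hxm := (PySem.List.mem_pyRange_one).mp hx
          have hxx : x = (j : Int) ∧ cellCond p (k : Int) x = true := by
            simpa using hxe
          omega
        have hjn : ¬ j < (s - 0).toNat := by omega
        have h1 : ¬ j < (bandLo s p (k : Int)).toNat := by omega
        have h2 : ¬ j < (bandLo s p (k : Int)).toNat +
            (bandHi s p (k : Int) - bandLo s p (k : Int)).toNat := by omega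
        have h3 : ¬ j < (bandLo s p (k : Int)).toNat +
            (bandHi s p (k : Int) - bandLo s p (k : Int)).toNat +
            (s - bandHi s p (k : Int)).toNat := by omega
        rw [if_neg hanyF, List.getElem?_map, PySem.List.getElem?_pyRange_one, if_neg hjn,
          if_neg h1, if_neg h2, if_neg h3]
        rfl
    · have hmem : (k : Int) ∉ PySem.List.pyRange 0 s 1 := by
        intro h
        have := (PySem.List.mem_pyRange_one).mp h
        omega
      have hks : ¬ ((k : Int) < s) := by omega
      simp [hmem, hks]
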